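-- pv_equiv track=rewrite | github.com/donghyuk01/python_gomoku | h_vs_h_omok.v3.py | rowCheck
-- ===== SOURCE A (Python) =====
-- def rowCheck(Piece_Number, board):
--     for row in board:
--         count = 0
--         for val in row:
--             if val == Piece_Number:
--                 count += 1
--                 if count == 5: return True
--             else: count = 0
--     return False
-- ===== SOURCE B (Python) =====
-- def rowCheck(Piece_Number, board):
--     target = [Piece_Number] * 5
--     for row in board:
--         for i in range(len(row) - 4):
--             if row[i:i+5] == target:
--                 return True
--     return False
-- ===== Notes on version B (the rewrite author's own statement) =====
-- stated objective: alternative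
-- what changed: Replaces A's running-counter scan (reset on mismatch, early exit at 5) with a sliding-window search: every length-5 slice of each row is compared against a precomputed [Piece_Number]*5 target list.
import Mathlib
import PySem

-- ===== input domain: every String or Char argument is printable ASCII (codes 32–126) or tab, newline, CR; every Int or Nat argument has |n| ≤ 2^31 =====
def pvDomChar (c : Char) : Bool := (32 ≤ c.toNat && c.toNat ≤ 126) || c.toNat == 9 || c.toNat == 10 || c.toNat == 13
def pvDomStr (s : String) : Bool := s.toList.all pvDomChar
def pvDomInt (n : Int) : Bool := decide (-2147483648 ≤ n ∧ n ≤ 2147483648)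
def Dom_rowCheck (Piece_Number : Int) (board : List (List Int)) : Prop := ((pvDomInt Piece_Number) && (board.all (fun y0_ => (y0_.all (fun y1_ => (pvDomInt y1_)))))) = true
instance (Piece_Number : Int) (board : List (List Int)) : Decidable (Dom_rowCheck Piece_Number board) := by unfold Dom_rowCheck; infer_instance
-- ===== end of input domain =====

-- B replaces A's running-counter scan by a sliding-window search comparing each
-- length-5 slice of a row against [Piece_Number]*5 (alternative; return values only).

-- ===== PORT A =====
-- inner loop of A: scan the row keeping the running count, early return at count == 5
def rowCheckRow (p : Int) (row : List Int) (count : Nat) : Bool :=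
  match row with
  | [] => false
  | v :: rest =>
    if v = p then
      if count + 1 = 5 then true else rowCheckRow p rest (count + 1)
    else rowCheckRow p rest 0

def rowCheck (Piece_Number : Int) (board : List (List Int)) : Bool :=
  board.any (fun row => rowCheckRow Piece_Number row 0)

-- ===== PORT B =====
-- row[i:i+5] with 0 ≤ i is exactly (row.drop i).take 5; Python's range(len(row)-4)
-- is empty when len(row) < 5, exactly like Nat subtraction here.
def rowCheck_alt (Piece_Number : Int) (board : List (List Int)) : Bool :=
  board.any (fun row =>
    (List.range (row.length - 4)).any (fun i =>
      ((row.drop i).take 5) == List.replicate 5 Piece_Number))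

-- ===== PRECONDITION & SPEC =====
def Spec_rowCheck (Piece_Number : Int) (board : List (List Int)) (out : Bool) : Prop := out = rowCheck_alt Piece_Number board
instance (Piece_Number : Int) (board : List (List Int)) (out : Bool) : Decidable (Spec_rowCheck Piece_Number board out) := by unfold Spec_rowCheck; infer_instance

-- ===== CLAIM (what is proved, stated in full; the proofs are below) =====
def Claim_equal_rowCheck : Prop := ∀ (Piece_Number : Int) (board : List (List Int)), Dom_rowCheck Piece_Number board → Spec_rowCheck Piece_Number board (rowCheck Piece_Number board)

-- ===== LEMMAS AND PROOFS =====

-- length of the leading run of p's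
def pvLead (p : Int) (l : List Int) : Nat := (l.takeWhile (fun x => x == p)).length

-- B's per-row test
def pvHasWin (p : Int) (l : List Int) : Bool :=
  (List.range (l.length - 4)).any (fun i =>
    ((l.drop i).take 5) == List.replicate 5 p)

theorem pvLead_cons_eq (p : Int) (rest : List Int) :
    pvLead p (p :: rest) = 1 + pvLead p rest := by
  simp [pvLead, List.takeWhile, Nat.add_comm]

theorem pvLead_cons_ne (p v : Int) (rest : List Int) (h : ¬ v = p) :
    pvLead p (v :: rest) = 0 := by
  simp [pvLead, List.takeWhile, show (v == p) = false from by simp [h]]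

theorem pvLead_le_length (p : Int) (l : List Int) : pvLead p l ≤ l.length :=
  (List.takeWhile_sublist _).length_le

-- l.take k equals a full block of p's iff the leading run has length ≥ k
theorem take_eq_rep (p : Int) : ∀ (k : Nat) (l : List Int),
    (l.take k = List.replicate k p) ↔ k ≤ pvLead p l := by
  intro k
  induction k with
  | zero => intro l; simp
  | succ k ih =>
    intro l
    cases l with
    | nil => simp [pvLead]
    | cons v rest =>
      by_cases hv : v = p
      · subst hv
        rw [pvLead_cons_eq]
        simp only [List.take_succ_cons, List.replicate_succ, List.cons.injEq, true_and]
        rw [ih rest]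
        omega
      · rw [pvLead_cons_ne p v rest hv]
        simp [List.replicate_succ, hv]

-- the window at index 0
theorem win0_eq_lead (p : Int) (l : List Int) :
    (((l.drop 0).take 5) == List.replicate 5 p) = decide (5 ≤ pvLead p l) := by
  simp only [List.drop_zero]
  by_cases h : 5 ≤ pvLead p l
  · simp [h, (take_eq_rep p 5 l).2 h]
  · have hne : ¬ l.take 5 = List.replicate 5 p := fun hc => h ((take_eq_rep p 5 l).1 hc)
    rw [decide_eq_false h, beq_eq_false_iff_ne]
    exact hne

-- window decomposition at a cons cell
theorem pvHasWin_cons (p v : Int) (rest : List Int) :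
    pvHasWin p (v :: rest) =
      (decide (5 ≤ pvLead p (v :: rest)) || pvHasWin p rest) := by
  unfold pvHasWin
  by_cases h : 4 ≤ rest.length
  · have hlen : (v :: rest).length - 4 = (rest.length - 4) + 1 := by
      simp only [List.length_cons]; omega
    rw [hlen, List.range_succ_eq_map]
    simp only [List.any_cons, List.any_map]
    rw [win0_eq_lead p (v :: rest)]
    congr 1
  · have h1 : (v :: rest).length - 4 = 0 := by simp only [List.length_cons]; omega
    have h2 : rest.length - 4 = 0 := by omega
    have h3 : ¬ 5 ≤ pvLead p (v :: rest) := by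
      have := pvLead_le_length p (v :: rest)
      simp only [List.length_cons] at this; omega
    simp [h2, h3]
    intro x hx
    exact absurd hx (by omega)

-- a leading run of length ≥ 5 makes B's test true
theorem lead_le_hasWin (p : Int) (l : List Int) (h : 5 ≤ pvLead p l) :
    pvHasWin p l = true := by
  have hlen : 5 ≤ l.length := le_trans h (pvLead_le_length p l)
  unfold pvHasWin
  rw [List.any_eq_true]
  refine ⟨0, ?_, ?_⟩
  · rw [List.mem_range]; omega
  · rw [win0_eq_lead p l]; simp [h]

-- main invariant: A's scanning loop equals the sliding-window test, offset by the count
theorem rowCheckRow_eq (p : Int) :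
    ∀ (row : List Int) (c : Nat), c < 5 →
      rowCheckRow p row c = (decide (5 ≤ c + pvLead p row) || pvHasWin p row) := by
  intro row
  induction row with
  | nil =>
    intro c hc
    simp [rowCheckRow, pvLead, pvHasWin]
    omega
  | cons v rest ih =>
    intro c hc
    by_cases hv : v = p
    · subst hv
      rw [rowCheckRow]
      rw [pvHasWin_cons, pvLead_cons_eq]
      by_cases h5 : c + 1 = 5
      · have h1 : 5 ≤ c + (1 + pvLead v rest) := by omega
        have h2 : 5 ≤ 1 + pvLead v rest ∨ True := Or.inr trivial
        simp [h5, h1]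
      · rw [if_neg h5, ih (c + 1) (by omega)]
        by_cases hb : 5 ≤ 1 + pvLead v rest
        · have h1 : 5 ≤ c + 1 + pvLead v rest := by omega
          have h2 : 5 ≤ c + (1 + pvLead v rest) := by omega
          simp [h1, h2, hb]
        · have h1 : (5 ≤ c + 1 + pvLead v rest) ↔ (5 ≤ c + (1 + pvLead v rest)) := by omega
          simp [hb, h1]
    · rw [rowCheckRow]
      rw [if_neg hv, ih 0 (by omega), pvHasWin_cons, pvLead_cons_ne p v rest hv]
      have hc0 : ¬ 5 ≤ c + 0 := by omega
      by_cases h2 : 5 ≤ pvLead p rest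
      · simp [lead_le_hasWin p rest h2, h2]
      · have h3 : ¬ (5 : Nat) ≤ 0 + pvLead p rest := by omega
        simp [h2]
        intro h5c
        omega

-- per-row agreement at count 0
theorem row_agree (p : Int) (row : List Int) :
    rowCheckRow p row 0 = pvHasWin p row := by
  rw [rowCheckRow_eq p row 0 (by omega)]
  by_cases h : 5 ≤ pvLead p row
  · simp [lead_le_hasWin p row h]
  · have h0 : ¬ 5 ≤ 0 + pvLead p row := by omega
    simp
    intro h1
    exact absurd h1 h

-- ===== VERDICT (by name: the statement is the Claim_ definition above) =====
theorem rowCheck_spec : Claim_equal_rowCheck := by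
  intro p board _
  unfold Spec_rowCheck rowCheck rowCheck_alt
  have h : (fun row => rowCheckRow p row 0) = fun row => pvHasWin p row :=
    funext (row_agree p)
  rw [h]
  rfl
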